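-- pv_equiv track=rewrite | github.com/gkdud3579/Algorithm-Practice | 백준/Silver/15565. 귀여운 라이언/귀여운 라이언.py | min_length_toys
-- ===== SOURCE A (Python) =====
-- def min_length_toys(toys, K):
--     start = end = 0
--     count = 0
--     min_length = float('inf')
--
--     while end < len(toys):
--         if toys[end] == 1:
--             count += 1
--
--         while count >= K:
--             min_length = min(min_length, end - start + 1)
--             if toys[start] == 1:
--                 count -= 1
--             start += 1
--
--         end += 1
--
--     return min_length if min_length != float('inf') else -1
-- ===== SOURCE B (Python) =====
-- def min_length_toys(toys, K):
--     pos = [i for i, t in enumerate(toys) if t == 1]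
--     if len(pos) < K:
--         return -1
--     return min(pos[i + K - 1] - pos[i] + 1 for i in range(len(pos) - K + 1))
-- ===== Notes on version B (the rewrite author's own statement) =====
-- stated objective: simpler
-- what changed: Replaces the live two-pointer sliding window (count plus inner start-advancing loop) by one pass extracting the lion positions and taking the minimum of pos[i+K-1]-pos[i]+1 over consecutive K-groups; fewer per-element operations.
-- outside the precondition, e.g. on min_length_toys([], 0): A returns -1, B raises IndexError
import Mathlib
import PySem

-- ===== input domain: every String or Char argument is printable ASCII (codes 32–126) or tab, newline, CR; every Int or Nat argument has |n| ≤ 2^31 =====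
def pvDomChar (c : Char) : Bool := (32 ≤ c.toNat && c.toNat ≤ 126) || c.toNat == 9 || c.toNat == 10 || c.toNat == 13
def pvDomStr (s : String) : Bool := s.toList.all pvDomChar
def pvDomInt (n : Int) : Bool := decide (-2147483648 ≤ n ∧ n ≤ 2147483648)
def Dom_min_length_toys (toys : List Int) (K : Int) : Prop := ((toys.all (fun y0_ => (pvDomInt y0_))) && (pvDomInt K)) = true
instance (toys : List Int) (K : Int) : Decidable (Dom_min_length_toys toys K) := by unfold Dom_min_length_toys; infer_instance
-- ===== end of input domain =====

-- B replaces A's two-pointer sliding window by a one-pass lion-position list and a minimum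
-- over consecutive K-groups of positions (objective: simpler).

-- ===== PORT A =====
-- Python's running minimum against float('inf'): none = inf, omin folds in one more candidate.
def omin (ml : Option Int) (v : Int) : Option Int :=
  some (match ml with | none => v | some m => min m v)

-- inner 'while count >= K' loop; fuel bounds the iterations, pyGet? none = Python's IndexError
-- (on inputs excluded by Pre_), where the state reached so far is returned.
def pyInnerA (toys : List Int) (K : Int) : Nat → Int → Int → Int → Option Int → (Int × Int × Option Int)
  | 0, start, count, _, ml => (start, count, ml)
  | fuel + 1, start, count, e, ml =>
    if K ≤ count then
      let ml' := omin ml (e - start + 1)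
      match PySem.List.pyGet? toys start with
      | none => (start, count, ml')
      | some v => pyInnerA toys K fuel (start + 1) (if v == 1 then count - 1 else count) e ml'
    else (start, count, ml)

-- outer 'while end < len(toys)' loop, walking the list with end counter e
def pyOuterA (toys : List Int) (K : Int) : List Int → Int → Int → Int → Option Int → Option Int
  | [], _, _, _, ml => ml
  | t :: rest, e, start, count, ml =>
    let count1 := if t == 1 then count + 1 else count
    match pyInnerA toys K (toys.length + 1) start count1 e ml with
    | (start', count', ml') => pyOuterA toys K rest (e + 1) start' count' ml'

def min_length_toys (toys : List Int) (K : Int) : Int :=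
  match pyOuterA toys K toys 0 0 0 none with
  | some m => m
  | none => -1

-- ===== PORT B =====
def min_length_toys_alt (toys : List Int) (K : Int) : Int :=
  let pos : List Int :=
    (PySem.List.enumerate toys 0).filterMap (fun p => if p.2 == 1 then some p.1 else none)
  if (pos.length : Int) < K then -1
  else
    match (PySem.List.pyRange 0 ((pos.length : Int) - K + 1) 1).map
        (fun i => (PySem.List.pyGet? pos (i + K - 1)).getD 0 - (PySem.List.pyGet? pos i).getD 0 + 1) with
    | [] => -1   -- unreachable for K ≥ 1: Python's min over the nonempty generator
    | h :: t => t.foldl min h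

-- ===== PRECONDITION & SPEC =====
-- Pre_ excludes K ≤ 0: there A raises IndexError on every nonempty toys (the inner loop's
-- count never drops below K before start runs off the list), and on empty toys B itself raises.
def Pre_min_length_toys (toys : List Int) (K : Int) : Prop := 1 ≤ K
instance (toys : List Int) (K : Int) : Decidable (Pre_min_length_toys toys K) := by
  unfold Pre_min_length_toys; infer_instance

def pvWitness_min_length_toys : List Int × Int := ([1, 0, 1, 1], 2)

def Spec_min_length_toys (toys : List Int) (K : Int) (out : Int) : Prop := out = min_length_toys_alt toys K
instance (toys : List Int) (K : Int) (out : Int) : Decidable (Spec_min_length_toys toys K out) := by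
  unfold Spec_min_length_toys; infer_instance

-- ===== CLAIM (what is proved, stated in full; the proofs are below) =====
def Claim_equal_min_length_toys : Prop := ∀ (toys : List Int) (K : Int), Dom_min_length_toys toys K → Pre_min_length_toys toys K → Spec_min_length_toys toys K (min_length_toys toys K)

-- ===== LEMMAS AND PROOFS =====

-- window lengths of all K consecutive lion positions, as a plain index map
def winLens (P : List Int) (K : Int) : List Int :=
  (List.range (P.length + 1 - K.toNat)).map
    (fun j => P.getD (j + (K.toNat - 1)) 0 - P.getD j 0 + 1)

theorem omin_omin (ml : Option Int) (a b : Int) (h : b ≤ a) :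
    omin (omin ml a) b = omin ml b := by
  cases ml <;> simp [omin] <;> omega

theorem foldl_omin_some (a : Int) (l : List Int) :
    List.foldl omin (some a) l = some (List.foldl min a l) := by
  induction l generalizing a with
  | nil => rfl
  | cons x xs ih => simp [omin, ih]

-- appending a position beyond a full window adds exactly one window length
theorem winLens_append_full (P : List Int) (K : Int) (x : Int)
    (hK : 1 ≤ K) (hlen : K.toNat ≤ P.length + 1) :
    winLens (P ++ [x]) K
      = winLens P K ++ [x - (P ++ [x]).getD (P.length + 1 - K.toNat) 0 + 1] := by
  have hk1 : 1 ≤ K.toNat := by omega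
  unfold winLens
  rw [show (P ++ [x]).length + 1 - K.toNat = (P.length + 1 - K.toNat) + 1 by
    simp [List.length_append]; omega]
  rw [List.range_succ, List.map_append]
  congr 1
  · apply List.map_congr_left
    intro j hj
    rw [List.mem_range] at hj
    rw [List.getD_append _ _ _ _ (by omega), List.getD_append _ _ _ _ (by omega)]
  · simp only [List.map_cons, List.map_nil]
    congr 3
    rw [show (P.length + 1 - K.toNat) + (K.toNat - 1) = P.length by omega]
    rw [List.getD_eq_getElem?_getD, List.getElem?_concat_length]
    rfl

-- appending a position while fewer than K lions exist keeps winLens empty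
theorem winLens_short (P : List Int) (K : Int) (h : P.length + 1 ≤ K.toNat) :
    winLens P K = [] := by
  simp [winLens, Nat.sub_eq_zero_of_le h]

-- the inner loop run: count = K, next lion at q ⇒ start jumps to q+1, min picks up e-q+1
theorem innerA_run (toys : List Int) (K e : Int) (hK : 1 ≤ K) :
    ∀ (d fuel : Nat) (s : Int) (ml : Option Int) (q : Int), q = s + d → 0 ≤ s →
    (∀ j : Int, s ≤ j → j < q → PySem.List.pyGet? toys j ≠ some 1) →
    PySem.List.pyGet? toys q = some 1 →
    d + 2 ≤ fuel →
    pyInnerA toys K fuel s K e ml = (q + 1, K - 1, omin ml (e - q + 1)) := by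
  intro d
  induction d with
  | zero =>
    intro fuel s ml q hq hs hno hlq hfuel
    obtain ⟨f, rfl⟩ : ∃ f, fuel = f + 1 + 1 := ⟨fuel - 2, by omega⟩
    have hqs : q = s := by omega
    subst hqs
    simp only [pyInnerA, if_pos (le_refl K), hlq]
    simp only [beq_self_eq_true, if_true]
    rw [if_neg (show ¬ K ≤ K - 1 by omega)]
  | succ d ih =>
    intro fuel s ml q hq hs hno hlq hfuel
    obtain ⟨f, rfl⟩ : ∃ f, fuel = f + 1 := ⟨fuel - 1, by omega⟩
    have hsq : s < q := by omega
    have hqlen : PySem.Raise.InRange toys.length q := by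
      by_contra h
      rw [← PySem.List.pyGet?_eq_none_iff] at h
      simp [h] at hlq
    have hslen : PySem.Raise.InRange toys.length s := by
      unfold PySem.Raise.InRange at hqlen ⊢; omega
    obtain ⟨v, hv⟩ : ∃ v, PySem.List.pyGet? toys s = some v := by
      cases hv : PySem.List.pyGet? toys s with
      | none => rw [PySem.List.pyGet?_eq_none_iff] at hv; exact absurd hslen hv
      | some v => exact ⟨v, rfl⟩
    have hv1 : (v == 1) = false := by
      have h1 := hno s le_rfl hsq
      rw [hv] at h1
      cases h : (v == 1) with
      | true => exact absurd (by rw [eq_of_beq h]) h1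
      | false => rfl
    simp only [pyInnerA, if_pos (le_refl K), hv, hv1, Bool.false_eq_true, if_neg (by decide : ¬False)]
    rw [ih f (s + 1) (omin ml (e - s + 1)) q (by omega) (by omega)
      (fun j h1 h2 => hno j (by omega) h2) hlq (by omega)]
    rw [omin_omin ml (e - s + 1) (e - q + 1) (by omega)]

-- main outer-loop invariant
theorem outer_inv (toys : List Int) (K : Int) (hK : 1 ≤ K) :
    ∀ (rest : List Int) (pre : List Int) (A B : List Int) (ml : Option Int)
      (start : Int),
      toys = pre ++ rest →
      start = (match A.getLast? with | none => 0 | some a => a + 1) →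
      0 ≤ start → start ≤ (pre.length : Int) →
      (∀ b ∈ B, start ≤ b ∧ b < (pre.length : Int) ∧ PySem.List.pyGet? toys b = some 1) →
      List.Pairwise (· < ·) B →
      (∀ j : Int, start ≤ j → j < (pre.length : Int) → PySem.List.pyGet? toys j = some 1 → j ∈ B) →
      ((B.length : Int) ≤ K - 1) →
      (A = [] ∨ (B.length : Int) = K - 1) →
      ml = List.foldl omin none (winLens (A ++ B) K) →
      pyOuterA toys K rest (pre.length : Int) start (B.length : Int) ml
        = List.foldl omin none
            (winLens ((A ++ B) ++
              (PySem.List.enumerate rest (pre.length : Int)).filterMap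
                (fun p => if p.2 == 1 then some p.1 else none)) K) := by
  intro rest
  induction rest with
  | nil =>
    intro pre A B ml start htoys hA hs0 hse hB1 hB2 hGap hcount hfired hml
    simpa [pyOuterA, PySem.List.enumerate_nil] using hml
  | cons t rest ih =>
    intro pre A B ml start htoys hA hs0 hse hB1 hB2 hGap hcount hfired hml
    have hlen : ((pre ++ [t]).length : Int) = (pre.length : Int) + 1 := by
      simp [List.length_append]
    have htoys' : toys = (pre ++ [t]) ++ rest := by simp [htoys]
    have hgetE : PySem.List.pyGet? toys (pre.length : Int) = some t := by
      rw [htoys]; exact PySem.List.pyGet?_append_length pre rest t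
    by_cases ht : (t == 1) = true
    · -- toys[end] == 1: count goes to |B| + 1
      have ht1 : t = 1 := by simpa using ht
      by_cases hlt : (B.length : Int) + 1 ≤ K - 1
      · -- still fewer than K lions: inner loop does not fire, e joins the window B
        have hAnil : A = [] := by
          rcases hfired with h | h
          · exact h
          · omega
        have hml0 : ml = none := by
          rw [hml, hAnil]
          rw [winLens_short _ _ (by simp; omega)]
          rfl
        have hinner : pyInnerA toys K (toys.length + 1) start ((B.length : Int) + 1)
            (pre.length : Int) ml = (start, (B.length : Int) + 1, ml) := by
          simp [pyInnerA, if_neg (show ¬ K ≤ (B.length : Int) + 1 by omega)]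
        have H := ih (pre ++ [t]) A (B ++ [(pre.length : Int)]) ml start htoys' hA hs0
          (by rw [hlen]; omega)
          (by
            intro b hb
            rcases List.mem_append.mp hb with hb | hb
            · obtain ⟨h1, h2, h3⟩ := hB1 b hb
              exact ⟨h1, by omega, h3⟩
            · rcases List.mem_singleton.mp hb with rfl
              exact ⟨hse, by omega, by rw [hgetE, ht1]⟩)
          (by
            rw [List.pairwise_append]
            exact ⟨hB2, List.pairwise_singleton _ _,
              fun b hb _ hm => by rcases List.mem_singleton.mp hm with rfl; exact (hB1 b hb).2.1⟩)
          (by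
            intro j h1 h2 h3
            rw [hlen] at h2
            rcases lt_or_eq_of_le (show j ≤ (pre.length : Int) by omega) with h | h
            · exact List.mem_append_left _ (hGap j h1 h h3)
            · exact List.mem_append_right _ (by simp [h]))
          (by simp only [List.length_append, List.length_cons, List.length_nil]; push_cast; omega)
          (Or.inl hAnil)
          (by
            rw [hml0, hAnil] at *
            rw [hAnil, winLens_short _ _ (by simp; omega : ([] ++ (B ++ [(pre.length : Int)])).length + 1 ≤ K.toNat)]
            rfl)
        rw [hlen] at H
        simp only [List.length_append, List.length_cons, List.length_nil] at H
        push_cast at H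
        simp only [pyOuterA, ht, if_true]
        rw [hinner]
        dsimp only
        rw [H]
        simp [PySem.List.enumerate_cons, ht1, List.append_assoc]
      · -- the window reaches K lions: the inner loop fires and advances start past q
        have heqK : (B.length : Int) + 1 = K := by omega
        -- Bq = B ++ [e] is the nonempty sorted list of the K lions in the window
        have hBq : ∃ q B', B ++ [(pre.length : Int)] = q :: B' := by
          cases B with
          | nil => exact ⟨_, _, rfl⟩
          | cons b bs => exact ⟨_, _, rfl⟩
        obtain ⟨q, B', hq⟩ := hBq
        have hBqSorted : List.Pairwise (· < ·) (B ++ [(pre.length : Int)]) := by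
          rw [List.pairwise_append]
          exact ⟨hB2, List.pairwise_singleton _ _,
            fun b hb _ hm => by rcases List.mem_singleton.mp hm with rfl; exact (hB1 b hb).2.1⟩
        have hqlt : ∀ b ∈ B', q < b := by
          have := hq ▸ hBqSorted
          exact fun b hb => (List.pairwise_cons.mp this).1 b hb
        have hB'sorted : List.Pairwise (· < ·) B' := by
          have := hq ▸ hBqSorted
          exact (List.pairwise_cons.mp this).2
        have hqmem : q ∈ B ++ [(pre.length : Int)] := by rw [hq]; exact List.mem_cons_self
        have hqlion : PySem.List.pyGet? toys q = some 1 := by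
          rcases List.mem_append.mp hqmem with h | h
          · exact (hB1 q h).2.2
          · rcases List.mem_singleton.mp h with rfl; rw [hgetE, ht1]
        have hsq : start ≤ q := by
          rcases List.mem_append.mp hqmem with h | h
          · exact (hB1 q h).1
          · rcases List.mem_singleton.mp h with rfl; exact hse
        have hqe : q ≤ (pre.length : Int) := by
          rcases List.mem_append.mp hqmem with h | h
          · exact le_of_lt (hB1 q h).2.1
          · rcases List.mem_singleton.mp h with rfl; exact le_rfl
        have hmemBq : ∀ b, b ∈ B ++ [(pre.length : Int)] → b = q ∨ b ∈ B' := by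
          intro b hb; rw [hq] at hb; exact List.mem_cons.mp hb
        have hmemB' : ∀ b, b ∈ B' → b ∈ B ++ [(pre.length : Int)] := by
          intro b hb; rw [hq]; exact List.mem_cons_of_mem _ hb
        have hnolion : ∀ j : Int, start ≤ j → j < q → PySem.List.pyGet? toys j ≠ some 1 := by
          intro j h1 h2 h3
          have hje : j < (pre.length : Int) := by omega
          have := hGap j h1 hje h3
          have := hqlt j (by
            rcases hmemBq j (List.mem_append_left _ this) with h | h
            · omega
            · exact h)
          omega
        have hlenB' : (B'.length : Int) = K - 1 := by
          have : (B ++ [(pre.length : Int)]).length = B.length + 1 := by simp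
          rw [hq] at this
          simp at this
          omega
        have hprelen : (pre.length : Int) < (toys.length : Int) := by
          rw [htoys]; simp
        have hinner : pyInnerA toys K (toys.length + 1) start K (pre.length : Int) ml
            = (q + 1, K - 1, omin ml ((pre.length : Int) - q + 1)) := by
          exact innerA_run toys K (pre.length : Int) hK (q - start).toNat (toys.length + 1)
            start ml q (by omega) hs0 hnolion hqlion (by omega)
        have hABassoc : (A ++ [q]) ++ B' = (A ++ B) ++ [(pre.length : Int)] := by
          rw [List.append_assoc, List.singleton_append, ← hq, ← List.append_assoc]
        have hml' : omin ml ((pre.length : Int) - q + 1)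
            = List.foldl omin none (winLens ((A ++ [q]) ++ B') K) := by
          rw [hABassoc]
          rw [winLens_append_full (A ++ B) K (pre.length : Int) hK (by simp; omega)]
          rw [show (A ++ B).length + 1 - K.toNat = A.length by simp; omega]
          rw [List.foldl_append]
          rw [List.getD_eq_getElem?_getD, List.append_assoc, List.getElem?_append_right le_rfl]
          simp only [Nat.sub_self]
          rw [hq]
          simp only [List.getElem?_cons_zero, Option.getD_some]
          rw [← hml]
          rfl
        have H := ih (pre ++ [t]) (A ++ [q]) B' (omin ml ((pre.length : Int) - q + 1)) (q + 1)
          htoys'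
          (by rw [List.getLast?_concat])
          (by omega)
          (by rw [hlen]; omega)
          (by
            intro b hb
            have hbm := hmemB' b hb
            have hlt := hqlt b hb
            rcases List.mem_append.mp hbm with h | h
            · obtain ⟨_, h2, h3⟩ := hB1 b h
              exact ⟨by omega, by omega, h3⟩
            · rcases List.mem_singleton.mp h with rfl
              exact ⟨by omega, by omega, by rw [hgetE, ht1]⟩)
          hB'sorted
          (by
            intro j h1 h2 h3
            rw [hlen] at h2
            rcases lt_or_eq_of_le (show j ≤ (pre.length : Int) by omega) with h | h
            · have := hGap j (by omega) h h3
              rcases hmemBq j (List.mem_append_left _ this) with h' | h'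
              · omega
              · exact h'
            · rcases hmemBq j (by rw [h]; exact List.mem_append_right _ (by simp)) with h' | h'
              · omega
              · exact h')
          (by omega)
          (Or.inr hlenB')
          hml'
        rw [hlen] at H
        simp only [pyOuterA, ht, if_true]
        rw [heqK, hinner]
        dsimp only
        have hcount' : K - 1 = (B'.length : Int) := by omega
        rw [hcount']
        rw [H]
        rw [show ((A ++ [q]) ++ B') = ((A ++ B) ++ [(pre.length : Int)]) from hABassoc]
        simp [PySem.List.enumerate_cons, ht1, List.append_assoc]
    · -- toys[end] != 1: nothing changes except end
      have hinner : pyInnerA toys K (toys.length + 1) start (B.length : Int)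
          (pre.length : Int) ml = (start, (B.length : Int), ml) := by
        simp [pyInnerA, if_neg (show ¬ K ≤ (B.length : Int) by omega)]
      have H := ih (pre ++ [t]) A B ml start htoys' hA hs0 (by rw [hlen]; omega)
        (by
          intro b hb
          obtain ⟨h1, h2, h3⟩ := hB1 b hb
          exact ⟨h1, by omega, h3⟩)
        hB2
        (by
          intro j h1 h2 h3
          rw [hlen] at h2
          rcases lt_or_eq_of_le (show j ≤ (pre.length : Int) by omega) with h | h
          · exact hGap j h1 h h3
          · rw [h, hgetE] at h3
            have ht1 : t = 1 := by simpa using h3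
            exact absurd (by simp [ht1]) ht)
        hcount hfired hml
      rw [hlen] at H
      simp only [pyOuterA, ht, Bool.false_eq_true, if_false]
      rw [hinner]
      dsimp only
      rw [H]
      have ht' : ¬ (t = 1) := fun h => ht (by simp [h])
      simp [PySem.List.enumerate_cons, ht']

theorem winLens_length (P : List Int) (K : Int) :
    (winLens P K).length = P.length + 1 - K.toNat := by
  simp [winLens]

-- ===== VERDICT (by name: the statement is the Claim_ definition above) =====
theorem min_length_toys_spec : Claim_equal_min_length_toys := by
  unfold Claim_equal_min_length_toys
  intro toys K _ hK
  unfold Pre_min_length_toys at hK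
  unfold Spec_min_length_toys
  have houter := outer_inv toys K hK toys [] [] [] none 0 (by simp) rfl le_rfl
    (by simp) (by simp) (by simp)
    (by intro j h1 h2 _; simp at h2; omega)
    (by simp; omega) (Or.inl rfl)
    (by rw [List.append_nil]; rw [winLens_short [] K (by simp; omega)]; rfl)
  simp only [List.length_nil, Nat.cast_zero, List.nil_append] at houter
  unfold min_length_toys min_length_toys_alt
  rw [houter]
  set pos : List Int :=
    (PySem.List.enumerate toys 0).filterMap (fun p => if p.2 == 1 then some p.1 else none) with hpos
  by_cases hc : (pos.length : Int) < K
  · rw [winLens_short pos K (by omega)]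
    rw [if_pos hc]
    rfl
  · rw [if_neg hc]
    have hlens : (PySem.List.pyRange 0 ((pos.length : Int) - K + 1) 1).map
          (fun i => (PySem.List.pyGet? pos (i + K - 1)).getD 0 - (PySem.List.pyGet? pos i).getD 0 + 1)
        = winLens pos K := by
      rw [PySem.List.pyRange_one, List.map_map]
      rw [show ((pos.length : Int) - K + 1 - 0).toNat = pos.length + 1 - K.toNat by omega]
      unfold winLens
      apply List.map_congr_left
      intro j hj
      rw [List.mem_range] at hj
      simp only [Function.comp]
      have h1 : (0 : Int) + (j : Int) + K - 1 = ((j + (K.toNat - 1) : Nat) : Int) := by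
        push_cast; omega
      have h2 : (0 : Int) + (j : Int) = ((j : Nat) : Int) := by ring
      rw [h1, h2, PySem.List.pyGet?_natCast, PySem.List.pyGet?_natCast]
      rw [List.getD_eq_getElem?_getD, List.getD_eq_getElem?_getD]
    rw [hlens]
    cases hw : winLens pos K with
    | nil =>
      exfalso
      have := winLens_length pos K
      rw [hw] at this
      simp at this
      omega
    | cons h t =>
      rw [show List.foldl omin none (h :: t) = List.foldl omin (omin none h) t from rfl]
      rw [show omin none h = some h from rfl]
      rw [foldl_omin_some]
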